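-- pv_equiv track=rewrite | github.com/tbtrung39/DHKL19CL_TTLTCB | lab_05/lab05.py | tach_so
-- ===== SOURCE A (Python) =====
-- from itertools import product
--
-- def tach_so(s):
--     n = len(s)
--     for mask in product([0, 1], repeat=n-1):
--         expr = s[0]
--         for i in range(n-1):
--             if mask[i] == 1:
--                 expr += "+"
--             expr += s[i+1]
--         yield expr
-- ===== SOURCE B (Python) =====
-- def tach_so(s):
--     # recursive generator: recurse on the prefix s[:-1]; the last split
--     # position varies fastest, matching itertools.product's lexicographic order
--     if len(s) == 1:
--         yield s
--         return
--     last = s[-1]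
--     for pre in tach_so(s[:-1]):
--         yield pre + last
--         yield pre + "+" + last
-- ===== Notes on version B (the rewrite author's own statement) =====
-- stated objective: alternative
-- what changed: Replaced the bitmask enumeration via itertools.product plus an inner index loop over the mask with a recursive generator on the prefix s[:-1] that extends each shorter expression by the last character, once without and once with an inserted plus sign.
import Mathlib
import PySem

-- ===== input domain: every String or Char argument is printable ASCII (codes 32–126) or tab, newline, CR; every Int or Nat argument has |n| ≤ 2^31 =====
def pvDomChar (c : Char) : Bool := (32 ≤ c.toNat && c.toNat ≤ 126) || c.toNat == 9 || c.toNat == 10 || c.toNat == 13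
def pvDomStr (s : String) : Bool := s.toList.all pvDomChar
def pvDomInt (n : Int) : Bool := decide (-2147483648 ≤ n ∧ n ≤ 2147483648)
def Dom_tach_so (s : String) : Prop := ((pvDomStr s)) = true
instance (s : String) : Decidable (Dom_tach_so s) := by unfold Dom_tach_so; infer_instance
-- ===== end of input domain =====

-- B replaces itertools.product bitmask enumeration with a recursive generator on the
-- prefix; same values in the same order (alternative decomposition, no speed claim).

-- ===== PORT A =====
-- itertools.product([0,1], repeat=k) in lexicographic order (first coordinate slowest)
def pyProduct01 : Nat → List (List Int)
  | 0 => [[]]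
  | k + 1 => ([0, 1] : List Int).flatMap (fun x => (pyProduct01 k).map (x :: ·))

-- the inner loop of A: expr starts as s[0]; for i in range(n-1) append a plus sign (if mask[i]==1) and s[i+1]
def buildA (c : Char) (rest : List Char) (mask : List Int) : List Char :=
  (List.range rest.length).foldl
    (fun expr i => (expr ++ (if mask.getD i 0 = 1 then ['+'] else [])) ++ [rest.getD i ' '])
    [c]

def tach_so (s : String) : List String :=
  match s.toList with
  | [] => []   -- outside Pre_: Python raises ValueError (product repeat=-1)
  | c :: rest => (pyProduct01 rest.length).map (fun m => String.mk (buildA c rest m))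

-- ===== PORT B =====
-- Source B recurses on s[:-1]; here the reversed character list makes that structural:
-- the head of the reversed list is the last character of the string
def bGo : List Char → List (List Char)
  | [] => []   -- outside Pre_: Python B raises IndexError on s[-1]
  | [c] => [[c]]
  | c :: d :: rest => (bGo (d :: rest)).flatMap (fun pre => [pre ++ [c], pre ++ ['+', c]])

def tach_so_alt (s : String) : List String := (bGo s.toList.reverse).map String.mk

-- ===== PRECONDITION & SPEC =====
-- Pre_ excludes only the empty string, on which A raises ValueError (product repeat=-1)
def Pre_tach_so (s : String) : Prop := s ≠ ""
instance (s : String) : Decidable (Pre_tach_so s) := by unfold Pre_tach_so; infer_instance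
def pvWitness_tach_so : String := "123"

def Spec_tach_so (s : String) (out : List String) : Prop := out = tach_so_alt s
instance (s : String) (out : List String) : Decidable (Spec_tach_so s out) := by unfold Spec_tach_so; infer_instance

-- ===== CLAIM =====
def Claim_equal_tach_so : Prop := ∀ (s : String), Dom_tach_so s → Pre_tach_so s → Spec_tach_so s (tach_so s)

-- ===== LEMMAS AND PROOFS =====

-- every mask in pyProduct01 k has length k
theorem mem_pyProduct01_length {k : Nat} {m : List Int} (h : m ∈ pyProduct01 k) : m.length = k := by
  induction k generalizing m with
  | zero => simp [pyProduct01] at h; simp [h]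
  | succ k ih =>
    simp [pyProduct01] at h
    rcases h with ⟨m', hm', rfl⟩ | ⟨m', hm', rfl⟩ <;> simp [ih hm']

-- product's lex order also decomposes on the LAST coordinate (it varies fastest)
theorem pyProduct01_succ_last (k : Nat) :
    pyProduct01 (k + 1) = (pyProduct01 k).flatMap (fun m => [m ++ [0], m ++ [1]]) := by
  induction k with
  | zero => simp [pyProduct01]
  | succ k ih =>
    conv_lhs => rw [pyProduct01, ih]
    rw [pyProduct01]
    simp [List.flatMap, List.map_map, Function.comp_def, List.map_flatten]

-- appending one character and one mask bit extends the built expression at the end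
theorem buildA_append (c : Char) (rest : List Char) (m : List Int) (x : Char) (b : Int)
    (hm : m.length = rest.length) :
    buildA c (rest ++ [x]) (m ++ [b]) =
      (buildA c rest m ++ (if b = 1 then ['+'] else [])) ++ [x] := by
  unfold buildA
  rw [List.length_append, List.length_singleton, List.range_succ, List.foldl_append]
  have hcongr : (List.range rest.length).foldl
      (fun expr i => (expr ++ (if (m ++ [b]).getD i 0 = 1 then ['+'] else [])) ++ [(rest ++ [x]).getD i ' '])
      [c]
      = (List.range rest.length).foldl
      (fun expr i => (expr ++ (if m.getD i 0 = 1 then ['+'] else [])) ++ [rest.getD i ' '])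
      [c] := by
    apply PySem.List.foldl_congr_mem
    intro acc i hi
    have hlt : i < rest.length := List.mem_range.mp hi
    rw [List.getD_append m [b] 0 i (by omega), List.getD_append rest [x] ' ' i hlt]
  rw [hcongr]
  simp only [List.foldl_cons, List.foldl_nil]
  have h1 : (m ++ [b]).getD rest.length 0 = b := by
    rw [List.getD_append_right m [b] 0 rest.length hm.le]
    simp [hm]
  have h2 : (rest ++ [x]).getD rest.length ' ' = x := by
    rw [List.getD_append_right rest [x] ' ' rest.length le_rfl]
    simp
  rw [h1, h2]

-- the core of A, on the character list
def aCore : List Char → List (List Char)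
  | [] => []
  | c :: rest => (pyProduct01 rest.length).map (buildA c rest)

-- A's list for cs ++ [x] is A's list for cs, each expression extended two ways
theorem aCore_append (cs : List Char) (hcs : cs ≠ []) (x : Char) :
    aCore (cs ++ [x]) = (aCore cs).flatMap (fun e => [e ++ [x], e ++ ['+', x]]) := by
  obtain ⟨c, rest, rfl⟩ := List.exists_cons_of_ne_nil hcs
  show aCore (c :: (rest ++ [x])) = _
  simp only [aCore]
  rw [List.length_append, List.length_singleton, pyProduct01_succ_last,
      List.map_flatMap, List.flatMap_map]
  apply List.flatMap_congr
  intro m hm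
  have hlen := mem_pyProduct01_length hm
  rw [List.map_cons, List.map_cons, List.map_nil,
      buildA_append c rest m x 0 (by omega), buildA_append c rest m x 1 (by omega)]
  simp

-- bGo on the reversed list computes aCore
theorem bGo_eq_aCore (rs : List Char) (h : rs ≠ []) : bGo rs = aCore rs.reverse := by
  induction rs with
  | nil => exact absurd rfl h
  | cons c rest ih =>
    cases rest with
    | nil => simp [bGo, aCore, pyProduct01, buildA]
    | cons d rest' =>
      rw [bGo, ih (by simp),
          show (c :: d :: rest').reverse = (d :: rest').reverse ++ [c] from
            List.reverse_cons,
          aCore_append _ (by simp) c]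

theorem toList_ne_nil {s : String} (h : s ≠ "") : s.toList ≠ [] := by
  simpa [String.toList_eq_nil_iff] using h

-- ===== VERDICT =====
theorem tach_so_spec : Claim_equal_tach_so := by
  intro s _ hpre
  unfold Spec_tach_so tach_so tach_so_alt
  rw [bGo_eq_aCore _ (by simpa using toList_ne_nil hpre), List.reverse_reverse]
  cases h : s.toList with
  | nil => exact absurd h (toList_ne_nil hpre)
  | cons c rest => simp [aCore]
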